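-- pv_equiv track=rewrite | github.com/KomodoPlatform/komodo-docs-mdx | utils/py/data/coins_config_loader.py | _get_preferred_electrum_servers
-- ===== SOURCE A (Python) =====
-- from typing import Dict, List, Optional, Any
--
-- def _get_preferred_electrum_servers(electrum_servers: Optional[List[Dict[str, Any]]]) -> List[Dict[str, Any]]:
--     """Get preferred electrum servers with cipig/komodo preference and SSL over TCP."""
--     if not electrum_servers:
--         # Fallback to default cipig electrum servers
--         return [
--             {"url": "electrum1.cipig.net:10001"},
--             {"url": "electrum2.cipig.net:10001"},
--             {"url": "electrum3.cipig.net:20001", "protocol": "SSL"}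
--         ]
--
--     # Sort electrum servers by preference
--     preferred_servers = []
--     other_servers = []
--
--     for server in electrum_servers:
--         url = server.get("url", "")
--         protocol = server.get("protocol", "TCP")
--
--         # Check if it's a preferred domain
--         is_preferred = any(domain in url.lower() for domain in ["cipig", "komodo"])
--
--         # Prefer SSL over TCP
--         is_secure = protocol.upper() == "SSL"
--
--         server_entry = {"url": url}
--         if protocol and protocol.upper() in ["SSL", "WSS"]:
--             server_entry["protocol"] = protocol
--
--         # Add WebSocket URL if available
--         if "ws_url" in server:
--             server_entry["ws_url"] = server["ws_url"]
--
--         if is_preferred: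
--             preferred_servers.append((server_entry, is_secure))
--         else:
--             other_servers.append((server_entry, is_secure))
--
--     # Sort by security (secure first)
--     preferred_servers.sort(key=lambda x: x[1], reverse=True)
--     other_servers.sort(key=lambda x: x[1], reverse=True)
--
--     # Combine and take up to 3 servers
--     final_servers = []
--
--     # Add preferred servers first
--     for server_entry, _ in preferred_servers:
--         if len(final_servers) < 3:
--             final_servers.append(server_entry)
--
--     # Add other servers if we need more
--     for server_entry, _ in other_servers:
--         if len(final_servers) < 3:
--             final_servers.append(server_entry)
--
--     # Ensure we have at least one server
--     if not final_servers and electrum_servers: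
--         final_servers = [{"url": electrum_servers[0].get("url", "")}]
--
--     return final_servers
-- ===== SOURCE B (Python) =====
-- from typing import Dict, List, Optional, Any
--
-- def _get_preferred_electrum_servers(electrum_servers: Optional[List[Dict[str, Any]]]) -> List[Dict[str, Any]]:
--     """Get preferred electrum servers with cipig/komodo preference and SSL over TCP."""
--     if not electrum_servers:
--         # Fallback to default cipig electrum servers
--         return [
--             {"url": "electrum1.cipig.net:10001"},
--             {"url": "electrum2.cipig.net:10001"},
--             {"url": "electrum3.cipig.net:20001", "protocol": "SSL"}
--         ]
--
--     # One stable linear pass: four ordered buckets keyed by (preferred, secure)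
--     pref_secure, pref_insecure, other_secure, other_insecure = [], [], [], []
--
--     for server in electrum_servers:
--         url = server.get("url", "")
--         protocol = server.get("protocol", "TCP")
--
--         server_entry = {"url": url}
--         if protocol and protocol.upper() in ["SSL", "WSS"]:
--             server_entry["protocol"] = protocol
--         if "ws_url" in server:
--             server_entry["ws_url"] = server["ws_url"]
--
--         is_preferred = "cipig" in url.lower() or "komodo" in url.lower()
--         is_secure = protocol.upper() == "SSL"
--
--         if is_preferred:
--             (pref_secure if is_secure else pref_insecure).append(server_entry)
--         else:
--             (other_secure if is_secure else other_insecure).append(server_entry)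
--
--     # Preferred before others, secure before insecure, original order within a bucket
--     return (pref_secure + pref_insecure + other_secure + other_insecure)[:3]
-- ===== Notes on version B (the rewrite author's own statement) =====
-- stated objective: simpler
-- what changed: Replaced A's partition-into-pairs plus two stable boolean sorts plus two capped append loops (and its unreachable at-least-one-server fallback) with a single pass that appends each server entry to one of four ordered buckets keyed by (preferred, secure), then concatenates the buckets and slices to 3.
import Mathlib
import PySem

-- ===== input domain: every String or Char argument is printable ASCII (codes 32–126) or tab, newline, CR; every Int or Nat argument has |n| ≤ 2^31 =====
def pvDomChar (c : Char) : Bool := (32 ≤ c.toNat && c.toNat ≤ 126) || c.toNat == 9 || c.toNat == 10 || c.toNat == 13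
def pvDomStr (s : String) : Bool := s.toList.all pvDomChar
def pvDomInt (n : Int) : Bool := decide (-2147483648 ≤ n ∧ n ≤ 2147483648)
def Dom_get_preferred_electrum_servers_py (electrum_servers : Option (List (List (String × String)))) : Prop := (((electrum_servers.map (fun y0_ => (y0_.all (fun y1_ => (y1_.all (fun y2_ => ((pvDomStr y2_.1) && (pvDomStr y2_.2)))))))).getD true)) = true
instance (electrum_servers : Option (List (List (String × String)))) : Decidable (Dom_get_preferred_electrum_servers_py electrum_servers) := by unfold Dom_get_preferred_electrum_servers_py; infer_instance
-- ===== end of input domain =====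

-- B replaces A's two stable boolean sorts and two capped append loops by one pass into four
-- ordered buckets (preferred/secure) concatenated and sliced to 3 (objective: simpler).

-- ===== PORT A =====
-- the fallback literal both Pythons contain verbatim
def pvFallback : List (List (String × String)) :=
  [[("url", "electrum1.cipig.net:10001")],
   [("url", "electrum2.cipig.net:10001")],
   [("url", "electrum3.cipig.net:20001"), ("protocol", "SSL")]]

-- A's loop-body values for one server: (server_entry, is_preferred, is_secure), the lets in A's order
def pvEntryA (server : List (String × String)) : (List (String × String)) × Bool × Bool :=
  let url := (PySem.Dict.mk server).getD "url" ""
  let protocol := (PySem.Dict.mk server).getD "protocol" "TCP"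
  let is_preferred := ["cipig", "komodo"].any (fun domain => PySem.Str.isIn domain (PySem.Str.lower url))
  let is_secure := PySem.Str.upper protocol == "SSL"
  let entry := [("url", url)]
  let entry := if protocol != "" && ["SSL", "WSS"].contains (PySem.Str.upper protocol)
               then entry ++ [("protocol", protocol)] else entry
  let entry := match (PySem.Dict.mk server).get? "ws_url" with
    | some w => entry ++ [("ws_url", w)]
    | none => entry
  (entry, is_preferred, is_secure)

def get_preferred_electrum_servers_py (electrum_servers : Option (List (List (String × String)))) : List (List (String × String)) :=
  match electrum_servers with
  | none => pvFallback                                   -- 'if not electrum_servers' (None)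
  | some [] => pvFallback                                -- 'if not electrum_servers' (empty list)
  | some (s0 :: rest) =>
    let po := (s0 :: rest).foldl (fun (acc : List ((List (String × String)) × Bool) × List ((List (String × String)) × Bool)) server =>
        if (pvEntryA server).2.1
        then (acc.1 ++ [((pvEntryA server).1, (pvEntryA server).2.2)], acc.2)
        else (acc.1, acc.2 ++ [((pvEntryA server).1, (pvEntryA server).2.2)])) ([], [])
    let preferred_servers := PySem.List.sorted po.1 (fun x => x.2) true
    let other_servers := PySem.List.sorted po.2 (fun x => x.2) true
    let final := preferred_servers.foldl (fun fs p => if fs.length < 3 then fs ++ [p.1] else fs) []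
    let final := other_servers.foldl (fun fs p => if fs.length < 3 then fs ++ [p.1] else fs) final
    -- 'if not final_servers and electrum_servers' (electrum_servers is truthy in this branch)
    if final.isEmpty then [[("url", (PySem.Dict.mk s0).getD "url" "")]] else final

-- ===== PORT B =====
-- B's loop-body values for one server, the lets in Source B's order
def pvEntryB (server : List (String × String)) : (List (String × String)) × Bool × Bool :=
  let url := (PySem.Dict.mk server).getD "url" ""
  let protocol := (PySem.Dict.mk server).getD "protocol" "TCP"
  let entry := [("url", url)]
  let entry := if protocol != "" && ["SSL", "WSS"].contains (PySem.Str.upper protocol)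
               then entry ++ [("protocol", protocol)] else entry
  let entry := match (PySem.Dict.mk server).get? "ws_url" with
    | some w => entry ++ [("ws_url", w)]
    | none => entry
  let is_preferred := PySem.Str.isIn "cipig" (PySem.Str.lower url) || PySem.Str.isIn "komodo" (PySem.Str.lower url)
  let is_secure := PySem.Str.upper protocol == "SSL"
  (entry, is_preferred, is_secure)

def get_preferred_electrum_servers_py_alt (electrum_servers : Option (List (List (String × String)))) : List (List (String × String)) :=
  match electrum_servers with
  | none => pvFallback
  | some [] => pvFallback
  | some (s0 :: rest) =>
    let b := (s0 :: rest).foldl (fun (acc : List (List (String × String)) × List (List (String × String)) × List (List (String × String)) × List (List (String × String))) server =>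
        if (pvEntryB server).2.1 then
          if (pvEntryB server).2.2 then (acc.1 ++ [(pvEntryB server).1], acc.2.1, acc.2.2.1, acc.2.2.2)
          else (acc.1, acc.2.1 ++ [(pvEntryB server).1], acc.2.2.1, acc.2.2.2)
        else
          if (pvEntryB server).2.2 then (acc.1, acc.2.1, acc.2.2.1 ++ [(pvEntryB server).1], acc.2.2.2)
          else (acc.1, acc.2.1, acc.2.2.1, acc.2.2.2 ++ [(pvEntryB server).1])) ([], [], [], [])
    (b.1 ++ b.2.1 ++ b.2.2.1 ++ b.2.2.2).take 3

-- ===== PRECONDITION & SPEC =====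
def Spec_get_preferred_electrum_servers_py (electrum_servers : Option (List (List (String × String)))) (out : List (List (String × String))) : Prop := out = get_preferred_electrum_servers_py_alt electrum_servers
instance (electrum_servers : Option (List (List (String × String)))) (out : List (List (String × String))) : Decidable (Spec_get_preferred_electrum_servers_py electrum_servers out) := by unfold Spec_get_preferred_electrum_servers_py; infer_instance

-- ===== CLAIM (what is proved, stated in full; the proofs are below) =====
def Claim_equal_get_preferred_electrum_servers_py : Prop := ∀ (electrum_servers : Option (List (List (String × String)))), Dom_get_preferred_electrum_servers_py electrum_servers → Spec_get_preferred_electrum_servers_py electrum_servers (get_preferred_electrum_servers_py electrum_servers)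

-- ===== LEMMAS AND PROOFS =====

-- the two loop bodies compute the same entry/flags triple
theorem pvEntryB_eq (server : List (String × String)) : pvEntryB server = pvEntryA server := by
  simp [pvEntryA, pvEntryB, List.any_cons, List.any_nil, Bool.or_false]

-- inserting into trues ++ falses under the reverse-boolean comparison
theorem pvInsertBool {α : Type} (key : α → Bool) (x : α) (ts fs : List α)
    (ht : ∀ t ∈ ts, key t = true) (hf : ∀ f ∈ fs, key f = false) :
    PySem.List.insertBy (fun a b => decide (key b < key a)) x (ts ++ fs) =
      if key x then ts ++ x :: fs else ts ++ fs ++ [x] := by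
  induction ts with
  | nil =>
    simp only [List.nil_append]
    induction fs with
    | nil => simp [PySem.List.insertBy]
    | cons f fs' ih =>
      have hfx : key f = false := hf f (by simp)
      cases hx : key x <;>
        simp_all [PySem.List.insertBy, Bool.lt_iff]
  | cons t ts' ih =>
    have htx : key t = true := ht t (by simp)
    have : (decide (key x < key t) : Bool) = decide (key x = false) := by
      cases hx : key x <;> simp [htx, Bool.lt_iff]
    cases hx : key x <;>
      simp_all [PySem.List.insertBy, Bool.lt_iff, List.cons_append]

-- A stable sort on a boolean key with reverse=True is: true-keyed elements first, order kept
theorem pvSortedBoolRev {α : Type} (l : List α) (key : α → Bool) :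
    PySem.List.sorted l key true = l.filter key ++ l.filter (fun x => !key x) := by
  rw [PySem.List.sorted_rev_eq_foldl_insertBy]
  suffices h : ∀ (l : List α) (ts fs : List α), (∀ t ∈ ts, key t = true) → (∀ f ∈ fs, key f = false) →
      l.foldl (fun acc x => PySem.List.insertBy (fun a b => decide (key b < key a)) x acc) (ts ++ fs) =
        (ts ++ l.filter key) ++ (fs ++ l.filter (fun x => !key x)) by
    simpa using h l [] [] (by simp) (by simp)
  intro l
  induction l with
  | nil => intro ts fs _ _; simp
  | cons x l' ih =>
    intro ts fs ht hf
    simp only [List.foldl_cons, pvInsertBool key x ts fs ht hf]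
    cases hx : key x with
    | true =>
      have h1 : ∀ t ∈ ts ++ [x], key t = true := by
        intro t htm; rcases List.mem_append.1 htm with h | h
        · exact ht t h
        · simp_all
      have := ih (ts ++ [x]) fs h1 hf
      simp only [List.append_assoc, List.singleton_append] at this
      simp [hx, this]
    | false =>
      have h2 : ∀ f ∈ fs ++ [x], key f = false := by
        intro f hfm; rcases List.mem_append.1 hfm with h | h
        · exact hf f h
        · simp_all
      have := ih ts (fs ++ [x]) ht h2
      rw [← List.append_assoc] at this
      rw [if_neg (by simp), this]
      simp [hx]

-- once the accumulator has length ≥ 3 the capped loop does nothing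
theorem pvCapFull {E : Type} (l : List (E × Bool)) (acc : List E) (h : 3 ≤ acc.length) :
    l.foldl (fun fs p => if fs.length < 3 then fs ++ [p.1] else fs) acc = acc := by
  induction l with
  | nil => rfl
  | cons x l' ih => simp [Nat.not_lt.2 h, ih]

-- the 'append while len < 3' loop is take 3
theorem pvCapFold {E : Type} (l : List (E × Bool)) (acc : List E) (h : acc.length ≤ 3) :
    l.foldl (fun fs p => if fs.length < 3 then fs ++ [p.1] else fs) acc =
      (acc ++ l.map Prod.fst).take 3 := by
  induction l generalizing acc with
  | nil => simp [List.take_of_length_le h]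
  | cons x l' ih =>
    by_cases hlt : acc.length < 3
    · have := ih (acc ++ [x.1]) (by simp; omega)
      simp only [List.foldl_cons, if_pos hlt, this, List.map_cons, List.append_assoc,
        List.singleton_append]
    · have h3 : acc.length = 3 := by omega
      rw [List.foldl_cons, if_neg hlt, pvCapFull _ _ (by omega)]
      rw [List.take_append]
      simp [h3, List.take_of_length_le (le_of_eq h3)]

theorem pvTakeTakeAppend {E : Type} (a b : List E) (n : Nat) :
    (a.take n ++ b).take n = (a ++ b).take n := by
  rw [List.take_append, List.take_append, List.take_take, min_self, List.length_take]
  rcases Nat.le_total a.length n with h | h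
  · simp [Nat.min_eq_right h]
  · simp [Nat.min_eq_left h, Nat.sub_eq_zero_of_le h]

-- closed form of A's partition loop
theorem pvFoldA (l : List (List (String × String))) (P O : List ((List (String × String)) × Bool)) :
    l.foldl (fun (acc : List ((List (String × String)) × Bool) × List ((List (String × String)) × Bool)) server =>
        if (pvEntryA server).2.1
        then (acc.1 ++ [((pvEntryA server).1, (pvEntryA server).2.2)], acc.2)
        else (acc.1, acc.2 ++ [((pvEntryA server).1, (pvEntryA server).2.2)])) (P, O) =
      (P ++ (l.filter (fun s => (pvEntryA s).2.1)).map (fun s => ((pvEntryA s).1, (pvEntryA s).2.2)),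
       O ++ (l.filter (fun s => !(pvEntryA s).2.1)).map (fun s => ((pvEntryA s).1, (pvEntryA s).2.2))) := by
  induction l generalizing P O with
  | nil => simp
  | cons x l' ih =>
    by_cases hx : (pvEntryA x).2.1 <;>
      simp [hx, ih]

-- closed form of B's bucket loop
theorem pvFoldB (l : List (List (String × String)))
    (ps pi osv oi : List (List (String × String))) :
    l.foldl (fun (acc : List (List (String × String)) × List (List (String × String)) × List (List (String × String)) × List (List (String × String))) server =>
        if (pvEntryB server).2.1 then
          if (pvEntryB server).2.2 then (acc.1 ++ [(pvEntryB server).1], acc.2.1, acc.2.2.1, acc.2.2.2)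
          else (acc.1, acc.2.1 ++ [(pvEntryB server).1], acc.2.2.1, acc.2.2.2)
        else
          if (pvEntryB server).2.2 then (acc.1, acc.2.1, acc.2.2.1 ++ [(pvEntryB server).1], acc.2.2.2)
          else (acc.1, acc.2.1, acc.2.2.1, acc.2.2.2 ++ [(pvEntryB server).1])) (ps, pi, osv, oi) =
      (ps ++ (l.filter (fun s => (pvEntryA s).2.1 && (pvEntryA s).2.2)).map (fun s => (pvEntryA s).1),
       pi ++ (l.filter (fun s => (pvEntryA s).2.1 && !(pvEntryA s).2.2)).map (fun s => (pvEntryA s).1),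
       osv ++ (l.filter (fun s => !(pvEntryA s).2.1 && (pvEntryA s).2.2)).map (fun s => (pvEntryA s).1),
       oi ++ (l.filter (fun s => !(pvEntryA s).2.1 && !(pvEntryA s).2.2)).map (fun s => (pvEntryA s).1)) := by
  induction l generalizing ps pi osv oi with
  | nil => simp
  | cons x l' ih =>
    rw [List.foldl_cons, pvEntryB_eq]
    by_cases h1 : (pvEntryA x).2.1 <;> by_cases h2 : (pvEntryA x).2.2 <;>
      simp [h1, h2, ih]

-- ===== VERDICT (by name: the statement is the Claim_ definition above) =====
set_option maxHeartbeats 1000000 in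
theorem get_preferred_electrum_servers_py_spec : Claim_equal_get_preferred_electrum_servers_py := by
  intro es _
  unfold Spec_get_preferred_electrum_servers_py
  cases es with
  | none => rfl
  | some l =>
  cases l with
  | nil => rfl
  | cons s0 rest =>
    simp only [get_preferred_electrum_servers_py, get_preferred_electrum_servers_py_alt]
    rw [pvFoldA, pvFoldB]
    simp only [List.nil_append]
    rw [pvSortedBoolRev, pvSortedBoolRev]
    rw [pvCapFold _ ([] : List (List (String × String))) (by simp),
      pvCapFold _ _ (List.length_take_le _ _)]
    rw [pvTakeTakeAppend]
    simp only [List.map_append, List.filter_map, List.filter_filter, List.map_map,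
      Function.comp_def]
    -- reconcile the filter predicates (conjunction order), then kill the dead guard
    simp only [Bool.and_comm]
    simp only [List.append_assoc]
    split_ifs with hc
    · exfalso
      rw [List.isEmpty_iff, List.take_eq_nil_iff] at hc
      rcases hc with h | h
      · omega
      · simp only [List.append_eq_nil_iff, List.map_eq_nil_iff, List.filter_eq_nil_iff] at h
        obtain ⟨-, h2, h3, h4a, h4b⟩ := h
        have k1 := h2 s0 (by simp)
        have k2 := h3 s0 (by simp)
        have k3 := h4a s0 (by simp)
        have k4 := h4b s0 (by simp)
        cases e1 : (pvEntryA s0).2.1 <;> cases e2 : (pvEntryA s0).2.2 <;>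
          simp [e1, e2] at k1 k2 k3 k4
    · rfl
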